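-- pv_equiv track=rewrite | github.com/cschin/pgr-tk | test_genomes/generate_e2e_report.py | svcnd_summary
-- ===== SOURCE A (Python) =====
-- SIZE_BINS = [
--     ("<200 bp",    lambda s: s < 200),
--     ("200 bp–1 kb", lambda s: 200 <= s < 1_000),
--     ("1 kb–10 kb",  lambda s: 1_000 <= s < 10_000),
--     ("≥10 kb",     lambda s: s >= 10_000),
-- ]
--
-- def svcnd_summary(records):
--     from collections import defaultdict
--     by_type    = defaultdict(int)
--     by_size    = {label: 0 for label, _ in SIZE_BINS}
--     by_chrom   = defaultdict(lambda: defaultdict(int))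
--     for chrom, start, end, sv_type in records:
--         size = end - start
--         by_type[sv_type] += 1
--         for label, pred in SIZE_BINS:
--             if pred(size):
--                 by_size[label] += 1
--                 break
--         by_chrom[chrom][sv_type] += 1
--     return by_type, by_size, by_chrom
-- ===== SOURCE B (Python) =====
-- _LABELS = ["<200 bp", "200 bp\u20131 kb", "1 kb\u201310 kb", "\u226510 kb"]
-- _THRESHOLDS = (200, 1_000, 10_000)
--
--
-- def svcnd_summary(records):
--     # by_type: brute-force count per distinct type (first-occurrence order)
--     types = [t for _, _, _, t in records]
--     by_type = {t: types.count(t) for t in dict.fromkeys(types)}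
--     # by_size: count sizes below each threshold, then take consecutive differences
--     sizes = [end - start for _, start, end, _ in records]
--     bounds = [sum(1 for v in sizes if v < th) for th in _THRESHOLDS] + [len(sizes)]
--     by_size = {}
--     prev = 0
--     for lab, c in zip(_LABELS, bounds):
--         by_size[lab] = c - prev
--         prev = c
--     # by_chrom: for each distinct chromosome, count each distinct type among its records
--     by_chrom = {}
--     for c in dict.fromkeys(ch for ch, _, _, _ in records):
--         ts = [t for ch, _, _, t in records if ch == c]
--         by_chrom[c] = {t: ts.count(t) for t in dict.fromkeys(ts)}
--     return by_type, by_size, by_chrom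
-- ===== Notes on version B (the rewrite author's own statement) =====
-- stated objective: alternative
-- what changed: Replaces A's single streaming loop with incrementally updated (default)dicts by per-distinct-key brute-force counting: by_type counts each first-occurrence-distinct type with list.count, by_size is computed from cumulative counts of sizes below each threshold via consecutive differences (no per-record bin scan), and by_chrom is built by iterating distinct chromosomes and counting each distinct type within that chromosome's records.
import Mathlib
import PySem

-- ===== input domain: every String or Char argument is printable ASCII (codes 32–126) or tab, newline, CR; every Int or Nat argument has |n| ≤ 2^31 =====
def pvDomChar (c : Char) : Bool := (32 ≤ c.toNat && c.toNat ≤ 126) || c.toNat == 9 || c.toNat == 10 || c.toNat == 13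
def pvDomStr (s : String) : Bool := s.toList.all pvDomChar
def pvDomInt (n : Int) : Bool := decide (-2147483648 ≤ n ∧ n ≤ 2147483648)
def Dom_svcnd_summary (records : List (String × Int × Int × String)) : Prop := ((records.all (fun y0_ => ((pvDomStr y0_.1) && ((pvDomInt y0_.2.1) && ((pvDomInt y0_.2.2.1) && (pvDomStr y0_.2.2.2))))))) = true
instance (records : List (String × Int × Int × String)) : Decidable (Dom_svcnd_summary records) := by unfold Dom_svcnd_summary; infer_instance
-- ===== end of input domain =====

-- B replaces A's single streaming loop (incrementally updated dicts, per-record bin scan) by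
-- per-distinct-key brute-force counting and cumulative-difference size binning: alternative algorithm, not faster.

-- ===== PORT A =====
def pvSIZE_BINS : List (String × (Int → Bool)) :=
  [("<200 bp",    fun s => s < 200),
   ("200 bp–1 kb", fun s => 200 ≤ s && s < 1000),
   ("1 kb–10 kb",  fun s => 1000 ≤ s && s < 10000),
   ("≥10 kb",     fun s => 10000 ≤ s)]

-- inner 'for label, pred in SIZE_BINS: if pred(size): by_size[label] += 1; break'
def pvBinLoopA (bins : List (String × (Int → Bool))) (size : Int)
    (bySize : PySem.Dict String Int) : PySem.Dict String Int :=
  match bins with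
  | [] => bySize
  | (label, pred) :: rest =>
    if pred size then bySize.insert label (bySize.getD label 0 + 1)
    else pvBinLoopA rest size bySize

def pvStepA (st : PySem.Dict String Int × PySem.Dict String Int × PySem.Dict String (PySem.Dict String Int))
    (r : String × Int × Int × String) :
    PySem.Dict String Int × PySem.Dict String Int × PySem.Dict String (PySem.Dict String Int) :=
  let size := r.2.2.1 - r.2.1
  let byType := st.1.insert r.2.2.2 (st.1.getD r.2.2.2 0 + 1)
  let bySize := pvBinLoopA pvSIZE_BINS size st.2.1
  let inner := st.2.2.getD r.1 PySem.Dict.empty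
  let byChrom := st.2.2.insert r.1 (inner.insert r.2.2.2 (inner.getD r.2.2.2 0 + 1))
  (byType, bySize, byChrom)

def svcnd_summary (records : List (String × Int × Int × String)) :
    (List (String × Int)) × (List (String × Int)) × (List (String × List (String × Int))) :=
  let bySize0 : PySem.Dict String Int := pvSIZE_BINS.foldl (fun d lp => d.insert lp.1 0) PySem.Dict.empty
  let res := records.foldl pvStepA (PySem.Dict.empty, bySize0, PySem.Dict.empty)
  (res.1.items, res.2.1.items, res.2.2.items.map (fun p => (p.1, p.2.items)))

-- ===== PORT B =====
def pvTHRESHOLDS : List Int := [200, 1000, 10000]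
def pvLABELS : List String := ["<200 bp", "200 bp–1 kb", "1 kb–10 kb", "≥10 kb"]

def svcnd_summary_alt (records : List (String × Int × Int × String)) :
    (List (String × Int)) × (List (String × Int)) × (List (String × List (String × Int))) :=
  -- by_type: brute-force count per distinct type (first-occurrence order)
  let types := records.map (fun r => r.2.2.2)
  let byType := (PySem.List.dedup types).map (fun t => (t, (types.count t : Int)))
  -- by_size: count sizes below each threshold, then take consecutive differences
  let sizes := records.map (fun r => r.2.2.1 - r.2.1)
  let bounds := pvTHRESHOLDS.map (fun th => ((sizes.countP (fun v => decide (v < th))) : Int))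
      ++ [(sizes.length : Int)]
  let bySize := (pvLABELS.zip bounds).foldl
      (fun (st : PySem.Dict String Int × Int) lc => (st.1.insert lc.1 (lc.2 - st.2), lc.2))
      (PySem.Dict.empty, 0)
  -- by_chrom: for each distinct chromosome, count each distinct type among its records
  let byChrom := (PySem.List.dedup (records.map (fun r => r.1))).map (fun c =>
      let ts := (records.filter (fun r => r.1 == c)).map (fun r => r.2.2.2)
      (c, (PySem.List.dedup ts).map (fun t => (t, (ts.count t : Int)))))
  (byType, bySize.1.items, byChrom)

-- ===== PRECONDITION & SPEC =====
def Spec_svcnd_summary (records : List (String × Int × Int × String)) (out : (List (String × Int)) × (List (String × Int)) × (List (String × List (String × Int)))) : Prop := out = svcnd_summary_alt records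
instance (records : List (String × Int × Int × String)) (out : (List (String × Int)) × (List (String × Int)) × (List (String × List (String × Int)))) : Decidable (Spec_svcnd_summary records out) := by unfold Spec_svcnd_summary; infer_instance

-- ===== CLAIM (what is proved, stated in full; the proofs are below) =====
def Claim_equal_svcnd_summary : Prop := ∀ (records : List (String × Int × Int × String)), Dom_svcnd_summary records → Spec_svcnd_summary records (svcnd_summary records)

-- ===== LEMMAS AND PROOFS =====

-- proof-only abbreviation: the size-bin label A's inner scan lands on
def pvLabelOf (s : Int) : String :=
  (pvLABELS[(pvTHRESHOLDS.countP (fun th => decide (th ≤ s)))]?).getD ""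

-- a fold whose triple state updates componentwise splits into three folds
theorem pv_foldl_prod3 {α β γ δ : Type} (f : α → δ → α) (g : β → δ → β) (h : γ → δ → γ)
    (xs : List δ) (a : α) (b : β) (c : γ) :
    xs.foldl (fun st x => (f st.1 x, g st.2.1 x, h st.2.2 x)) (a, b, c)
      = (xs.foldl f a, xs.foldl g b, xs.foldl h c) := by
  induction xs generalizing a b c with
  | nil => rfl
  | cons x xs ih => simpa using ih (f a x) (g b x) (h c x)

-- A's first-matching-bin scan increments exactly the label pvLabelOf picks
theorem pv_bin_step (size : Int) (d : PySem.Dict String Int) :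
    pvBinLoopA pvSIZE_BINS size d
      = d.insert (pvLabelOf size) (d.getD (pvLabelOf size) 0 + 1) := by
  rcases lt_or_ge size 200 with h1 | h1
  · have n1 : ¬ (200 : Int) ≤ size := by omega
    have n2 : ¬ (1000 : Int) ≤ size := by omega
    have n3 : ¬ (10000 : Int) ≤ size := by omega
    simp [pvBinLoopA, pvSIZE_BINS, pvLabelOf, pvLABELS, pvTHRESHOLDS, n1, n2, n3, h1]
  · rcases lt_or_ge size 1000 with h2 | h2
    · have n2 : ¬ (1000 : Int) ≤ size := by omega
      have n3 : ¬ (10000 : Int) ≤ size := by omega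
      simp [pvBinLoopA, pvSIZE_BINS, pvLabelOf, pvLABELS, pvTHRESHOLDS, h1, n2, n3, h2, not_lt.mpr h1]
    · rcases lt_or_ge size 10000 with h3 | h3
      · have n3 : ¬ (10000 : Int) ≤ size := by omega
        simp [pvBinLoopA, pvSIZE_BINS, pvLabelOf, pvLABELS, pvTHRESHOLDS, h1, h2, n3, h3,
          not_lt.mpr h1, not_lt.mpr h2]
      · simp [pvBinLoopA, pvSIZE_BINS, pvLabelOf, pvLABELS, pvTHRESHOLDS, h1, h2, h3,
          not_lt.mpr h1, not_lt.mpr h2, not_lt.mpr h3]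

-- the four regions of pvLabelOf
theorem pv_label0 (s : Int) (h : s < 200) : pvLabelOf s = "<200 bp" := by
  have n1 : ¬ (200 : Int) ≤ s := by omega
  have n2 : ¬ (1000 : Int) ≤ s := by omega
  have n3 : ¬ (10000 : Int) ≤ s := by omega
  simp [pvLabelOf, pvLABELS, pvTHRESHOLDS, n1, n2, n3]

theorem pv_label1 (s : Int) (h1 : 200 ≤ s) (h2 : s < 1000) : pvLabelOf s = "200 bp–1 kb" := by
  have n2 : ¬ (1000 : Int) ≤ s := by omega
  have n3 : ¬ (10000 : Int) ≤ s := by omega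
  simp [pvLabelOf, pvLABELS, pvTHRESHOLDS, h1, n2, n3]

theorem pv_label2 (s : Int) (h1 : 1000 ≤ s) (h2 : s < 10000) : pvLabelOf s = "1 kb–10 kb" := by
  have g1 : (200 : Int) ≤ s := by omega
  have n3 : ¬ (10000 : Int) ≤ s := by omega
  simp [pvLabelOf, pvLABELS, pvTHRESHOLDS, g1, h1, n3]

theorem pv_label3 (s : Int) (h1 : 10000 ≤ s) : pvLabelOf s = "≥10 kb" := by
  have g1 : (200 : Int) ≤ s := by omega
  have g2 : (1000 : Int) ≤ s := by omega
  simp [pvLabelOf, pvLABELS, pvTHRESHOLDS, g1, g2, h1]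

theorem pv_label_mem (s : Int) : pvLabelOf s ∈ pvLABELS := by
  rcases lt_or_ge s 200 with h | h
  · rw [pv_label0 s h]; simp [pvLABELS]
  · rcases lt_or_ge s 1000 with h2 | h2
    · rw [pv_label1 s h h2]; simp [pvLABELS]
    · rcases lt_or_ge s 10000 with h3 | h3
      · rw [pv_label2 s h2 h3]; simp [pvLABELS]
      · rw [pv_label3 s h3]; simp [pvLABELS]

-- counting a conjunction: countP p = countP q + countP (p ∧ ¬q) when q implies p on the list
theorem pv_countP_split {α : Type} (l : List α) (p q : α → Bool)
    (h : ∀ a ∈ l, q a = true → p a = true) :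
    l.countP p = l.countP q + l.countP (fun a => p a && !q a) := by
  induction l with
  | nil => rfl
  | cons x xs ih =>
    have hx := h x (by simp)
    have ihx := ih (fun a ha => h a (by simp [ha]))
    by_cases hq : q x = true
    · simp [hq, hx hq, ihx]; omega
    · simp at hq
      by_cases hp : p x = true <;> simp [hq, hp, ihx] <;> omega

-- adding elements already present leaves a PySem set unchanged
theorem pv_update_eq_self {α : Type} [BEq α] [LawfulBEq α] (l : List α) (s : PySem.Set α)
    (h : ∀ x ∈ l, x ∈ s) : PySem.Set.update s l = s := by
  induction l generalizing s with
  | nil => rfl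
  | cons x xs ih =>
    have hmem : x ∈ s := h x (by simp)
    have hx : PySem.Set.add s x = s := by simp [PySem.Set.add, hmem]
    show PySem.Set.update (PySem.Set.add s x) xs = s
    rw [hx]
    exact ih s (fun y hy => h y (by simp [hy]))

-- the nested grouping fold, read off at one chromosome: a type-counting fold over that
-- chromosome's records
theorem pv_group_getD (l : List (String × Int × Int × String))
    (d : PySem.Dict String (PySem.Dict String Int)) (c : String) :
    (l.foldl (fun o r =>
        let inner := o.getD r.1 PySem.Dict.empty
        o.insert r.1 (inner.insert r.2.2.2 (inner.getD r.2.2.2 0 + 1))) d).getD c PySem.Dict.empty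
      = ((l.filter (fun r => r.1 == c)).map (fun r => r.2.2.2)).foldl
          (fun dd t => dd.insert t (dd.getD t 0 + 1)) (d.getD c PySem.Dict.empty) := by
  induction l generalizing d with
  | nil => rfl
  | cons r l ih =>
    simp only [List.foldl_cons, ih, List.filter_cons]
    by_cases h : r.1 = c
    · simp [h]
    · have h' : (r.1 == c) = false := by simpa using h
      have h'' : ¬ c = r.1 := fun hc => h hc.symm
      simp [h', PySem.Dict.getD_insert, h'']

-- keys and zero defaults of A's initial by_size dict, and the fold's items once keys are known
theorem pv_by_size_items (L : List String) (hL : ∀ x ∈ L, x ∈ pvLABELS) :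
    ((L.foldl (fun d x => d.insert x (d.getD x 0 + 1))
        (pvSIZE_BINS.foldl (fun (d : PySem.Dict String Int) lp => d.insert lp.1 0) PySem.Dict.empty)).items)
    = [("<200 bp", (L.count "<200 bp" : Int)), ("200 bp–1 kb", (L.count "200 bp–1 kb" : Int)),
       ("1 kb–10 kb", (L.count "1 kb–10 kb" : Int)), ("≥10 kb", (L.count "≥10 kb" : Int))] := by
  have hk : (L.foldl (fun d x => d.insert x (d.getD x 0 + 1))
      (pvSIZE_BINS.foldl (fun (d : PySem.Dict String Int) lp => d.insert lp.1 0) PySem.Dict.empty)).keys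
      = pvLABELS := by
    rw [PySem.Dict.keys_foldl_insert]
    rw [show (pvSIZE_BINS.foldl (fun (d : PySem.Dict String Int) lp => d.insert lp.1 0) PySem.Dict.empty).keys
        = pvLABELS from rfl]
    exact pv_update_eq_self L pvLABELS hL
  have hnd : (L.foldl (fun d x => d.insert x (d.getD x 0 + 1))
      (pvSIZE_BINS.foldl (fun (d : PySem.Dict String Int) lp => d.insert lp.1 0) PySem.Dict.empty)).keys.Nodup := by
    rw [hk]; decide
  rw [PySem.Dict.items_eq_map_keys _ hnd 0, hk]
  simp [pvLABELS, PySem.Dict.getD_foldl_insert_add_one,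
    show (pvSIZE_BINS.foldl (fun (d : PySem.Dict String Int) lp => d.insert lp.1 0) PySem.Dict.empty).getD "<200 bp" 0 = 0 from rfl,
    show (pvSIZE_BINS.foldl (fun (d : PySem.Dict String Int) lp => d.insert lp.1 0) PySem.Dict.empty).getD "200 bp–1 kb" 0 = 0 from rfl,
    show (pvSIZE_BINS.foldl (fun (d : PySem.Dict String Int) lp => d.insert lp.1 0) PySem.Dict.empty).getD "1 kb–10 kb" 0 = 0 from rfl,
    show (pvSIZE_BINS.foldl (fun (d : PySem.Dict String Int) lp => d.insert lp.1 0) PySem.Dict.empty).getD "≥10 kb" 0 = 0 from rfl]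

-- B's zip-and-difference fold, evaluated on the four labels
theorem pv_zip_fold_items (b0 b1 b2 b3 : Int) :
    ((pvLABELS.zip [b0, b1, b2, b3]).foldl
        (fun (st : PySem.Dict String Int × Int) lc => (st.1.insert lc.1 (lc.2 - st.2), lc.2))
        (PySem.Dict.empty, 0)).1.items
    = [("<200 bp", b0 - 0), ("200 bp–1 kb", b1 - b0), ("1 kb–10 kb", b2 - b1), ("≥10 kb", b3 - b2)] := rfl

-- ===== VERDICT (by name: the statement is the Claim_ definition above) =====
theorem svcnd_summary_spec : Claim_equal_svcnd_summary := by
  intro records _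
  unfold Spec_svcnd_summary svcnd_summary svcnd_summary_alt
  have hstep : pvStepA = (fun st (r : String × Int × Int × String) =>
      ((fun (d : PySem.Dict String Int) (r : String × Int × Int × String) =>
          d.insert r.2.2.2 (d.getD r.2.2.2 0 + 1)) st.1 r,
       (fun (d : PySem.Dict String Int) (r : String × Int × Int × String) =>
          pvBinLoopA pvSIZE_BINS (r.2.2.1 - r.2.1) d) st.2.1 r,
       (fun (o : PySem.Dict String (PySem.Dict String Int)) (r : String × Int × Int × String) =>
          let inner := o.getD r.1 PySem.Dict.empty
          o.insert r.1 (inner.insert r.2.2.2 (inner.getD r.2.2.2 0 + 1))) st.2.2 r)) := rfl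
  dsimp only
  rw [hstep, pv_foldl_prod3
      (fun (d : PySem.Dict String Int) (r : String × Int × Int × String) =>
        d.insert r.2.2.2 (d.getD r.2.2.2 0 + 1))
      (fun (d : PySem.Dict String Int) (r : String × Int × Int × String) =>
        pvBinLoopA pvSIZE_BINS (r.2.2.1 - r.2.1) d)
      (fun (o : PySem.Dict String (PySem.Dict String Int)) (r : String × Int × Int × String) =>
        let inner := o.getD r.1 PySem.Dict.empty
        o.insert r.1 (inner.insert r.2.2.2 (inner.getD r.2.2.2 0 + 1)))]
  refine congrArg₂ Prod.mk ?_ (congrArg₂ Prod.mk ?_ ?_)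
  · -- by_type
    have hT : List.foldl (fun (d : PySem.Dict String Int) (r : String × Int × Int × String) =>
        d.insert r.2.2.2 (d.getD r.2.2.2 0 + 1)) PySem.Dict.empty records
        = PySem.Dict.counter (records.map (fun r => r.2.2.2)) := by
      rw [← PySem.Dict.foldl_insert_getD_add_one_eq_counter, List.foldl_map]
    rw [hT, PySem.Dict.items_counter]
    simp [PySem.List.dedup_eq_ofList]
  · -- by_size
    have hfun : (fun (d : PySem.Dict String Int) (r : String × Int × Int × String) =>
        pvBinLoopA pvSIZE_BINS (r.2.2.1 - r.2.1) d)
        = fun d r => d.insert (pvLabelOf (r.2.2.1 - r.2.1))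
            (d.getD (pvLabelOf (r.2.2.1 - r.2.1)) 0 + 1) := by
      funext d r; exact pv_bin_step _ _
    have hm : List.foldl (fun (d : PySem.Dict String Int) x => d.insert x (d.getD x 0 + 1))
        (pvSIZE_BINS.foldl (fun (d : PySem.Dict String Int) lp => d.insert lp.1 0) PySem.Dict.empty)
        (records.map (fun r => pvLabelOf (r.2.2.1 - r.2.1)))
        = List.foldl (fun d r => d.insert (pvLabelOf (r.2.2.1 - r.2.1))
            (d.getD (pvLabelOf (r.2.2.1 - r.2.1)) 0 + 1))
          (pvSIZE_BINS.foldl (fun (d : PySem.Dict String Int) lp => d.insert lp.1 0) PySem.Dict.empty)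
          records := by
      rw [List.foldl_map]
    rw [hfun, ← hm,
      pv_by_size_items _ (by
        intro x hx
        simp only [List.mem_map] at hx
        obtain ⟨r, _, rfl⟩ := hx
        exact pv_label_mem _)]
    rw [show (pvTHRESHOLDS.map (fun th =>
          (((records.map (fun r => r.2.2.1 - r.2.1)).countP (fun v => decide (v < th))) : Int))
          ++ [((records.map (fun r => r.2.2.1 - r.2.1)).length : Int)])
        = [(((records.map (fun r => r.2.2.1 - r.2.1)).countP (fun v => decide (v < 200))) : Int),
           (((records.map (fun r => r.2.2.1 - r.2.1)).countP (fun v => decide (v < 1000))) : Int),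
           (((records.map (fun r => r.2.2.1 - r.2.1)).countP (fun v => decide (v < 10000))) : Int),
           ((records.map (fun r => r.2.2.1 - r.2.1)).length : Int)] from by simp [pvTHRESHOLDS],
      pv_zip_fold_items]
    have hsz : ∀ th : Int, (records.map (fun r => r.2.2.1 - r.2.1)).countP (fun v => decide (v < th))
        = records.countP (fun r => decide (r.2.2.1 - r.2.1 < th)) := by
      intro th; rw [List.countP_map]; rfl
    have hcnt : ∀ lab : String,
        (records.map (fun r => pvLabelOf (r.2.2.1 - r.2.1))).count lab
        = records.countP (fun r => pvLabelOf (r.2.2.1 - r.2.1) == lab) := by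
      intro lab; rw [List.count, List.countP_map]; rfl
    have e0 : records.countP (fun r => pvLabelOf (r.2.2.1 - r.2.1) == "<200 bp")
        = records.countP (fun r => decide (r.2.2.1 - r.2.1 < 200)) := by
      apply List.countP_congr; intro r _
      rcases lt_or_ge (r.2.2.1 - r.2.1) 200 with h | h
      · simp [pv_label0 _ h, h]
      · rcases lt_or_ge (r.2.2.1 - r.2.1) 1000 with h2 | h2
        · simp [pv_label1 _ h h2, not_lt.mpr h]
        · rcases lt_or_ge (r.2.2.1 - r.2.1) 10000 with h3 | h3
          · simp [pv_label2 _ h2 h3, not_lt.mpr h]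
          · simp [pv_label3 _ h3, not_lt.mpr h]
    have e1 : records.countP (fun r => pvLabelOf (r.2.2.1 - r.2.1) == "200 bp–1 kb")
        = records.countP (fun r => decide (r.2.2.1 - r.2.1 < 1000) && !decide (r.2.2.1 - r.2.1 < 200)) := by
      apply List.countP_congr; intro r _
      rcases lt_or_ge (r.2.2.1 - r.2.1) 200 with h | h
      · simp [pv_label0 _ h, h, (show r.2.2.1 - r.2.1 < 1000 by omega)]
      · rcases lt_or_ge (r.2.2.1 - r.2.1) 1000 with h2 | h2
        · simp [pv_label1 _ h h2, h2, not_lt.mpr h]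
        · rcases lt_or_ge (r.2.2.1 - r.2.1) 10000 with h3 | h3
          · simp [pv_label2 _ h2 h3, not_lt.mpr h2]
          · simp [pv_label3 _ h3, not_lt.mpr h2]
    have e2 : records.countP (fun r => pvLabelOf (r.2.2.1 - r.2.1) == "1 kb–10 kb")
        = records.countP (fun r => decide (r.2.2.1 - r.2.1 < 10000) && !decide (r.2.2.1 - r.2.1 < 1000)) := by
      apply List.countP_congr; intro r _
      rcases lt_or_ge (r.2.2.1 - r.2.1) 200 with h | h
      · simp [pv_label0 _ h, (show r.2.2.1 - r.2.1 < 1000 by omega)]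
      · rcases lt_or_ge (r.2.2.1 - r.2.1) 1000 with h2 | h2
        · simp [pv_label1 _ h h2, h2]
        · rcases lt_or_ge (r.2.2.1 - r.2.1) 10000 with h3 | h3
          · simp [pv_label2 _ h2 h3, h3, not_lt.mpr h2]
          · simp [pv_label3 _ h3, not_lt.mpr h3]
    have e3 : records.countP (fun r => pvLabelOf (r.2.2.1 - r.2.1) == "≥10 kb")
        = records.countP (fun r => !decide (r.2.2.1 - r.2.1 < 10000)) := by
      apply List.countP_congr; intro r _
      rcases lt_or_ge (r.2.2.1 - r.2.1) 200 with h | h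
      · simp [pv_label0 _ h, (show r.2.2.1 - r.2.1 < 10000 by omega)]
      · rcases lt_or_ge (r.2.2.1 - r.2.1) 1000 with h2 | h2
        · simp [pv_label1 _ h h2, (show r.2.2.1 - r.2.1 < 10000 by omega)]
        · rcases lt_or_ge (r.2.2.1 - r.2.1) 10000 with h3 | h3
          · simp [pv_label2 _ h2 h3, h3]
          · simp [pv_label3 _ h3, not_lt.mpr h3]
    have s1 : records.countP (fun r => decide (r.2.2.1 - r.2.1 < 1000))
        = records.countP (fun r => decide (r.2.2.1 - r.2.1 < 200))
          + records.countP (fun r => decide (r.2.2.1 - r.2.1 < 1000) && !decide (r.2.2.1 - r.2.1 < 200)) :=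
      pv_countP_split _ _ _ (fun r _ hq => by simp at hq ⊢; omega)
    have s2 : records.countP (fun r => decide (r.2.2.1 - r.2.1 < 10000))
        = records.countP (fun r => decide (r.2.2.1 - r.2.1 < 1000))
          + records.countP (fun r => decide (r.2.2.1 - r.2.1 < 10000) && !decide (r.2.2.1 - r.2.1 < 1000)) :=
      pv_countP_split _ _ _ (fun r _ hq => by simp at hq ⊢; omega)
    have s3 : records.length
        = records.countP (fun r => decide (r.2.2.1 - r.2.1 < 10000))
          + records.countP (fun r => !decide (r.2.2.1 - r.2.1 < 10000)) := by
      have := pv_countP_split records (fun _ => true) (fun r => decide (r.2.2.1 - r.2.1 < 10000))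
        (fun _ _ _ => rfl)
      simpa using this
    simp only [hsz, hcnt, e0, e1, e2, e3, List.length_map, List.cons.injEq, Prod.mk.injEq]
    exact ⟨⟨trivial, by omega⟩, ⟨trivial, by omega⟩, ⟨trivial, by omega⟩, ⟨trivial, by omega⟩, trivial⟩
  · -- by_chrom
    have hkeys : (records.foldl (fun (o : PySem.Dict String (PySem.Dict String Int)) r =>
        let inner := o.getD r.1 PySem.Dict.empty
        o.insert r.1 (inner.insert r.2.2.2 (inner.getD r.2.2.2 0 + 1))) PySem.Dict.empty).keys
        = PySem.Set.ofList (records.map (fun r => r.1)) := by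
      rw [PySem.Dict.keys_foldl_insert_key records (fun r => r.1)]
      simp [PySem.Set.update_nil_left]
    have hnd : (records.foldl (fun (o : PySem.Dict String (PySem.Dict String Int)) r =>
        let inner := o.getD r.1 PySem.Dict.empty
        o.insert r.1 (inner.insert r.2.2.2 (inner.getD r.2.2.2 0 + 1))) PySem.Dict.empty).keys.Nodup := by
      apply PySem.Dict.nodup_keys_foldl_insert_key
      simp
    rw [PySem.Dict.items_eq_map_keys _ hnd PySem.Dict.empty, hkeys, List.map_map]
    apply List.map_congr_left
    intro c _
    simp only [Function.comp]
    refine congrArg₂ Prod.mk rfl ?_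
    rw [pv_group_getD]
    simp only [PySem.Dict.getD_empty]
    rw [PySem.Dict.foldl_insert_getD_add_one_eq_counter, PySem.Dict.items_counter]
    simp [PySem.List.dedup_eq_ofList]
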